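-- pv_equiv track=rewrite | github.com/MattFisher/hangman-bench | analysis/measure_difficulty.py | best_move_freq_raw
-- ===== SOURCE A (Python) =====
-- from typing import Dict, List, Optional, Sequence, Tuple
--
-- ALPHABET = [chr(c) for c in range(ord("a"), ord("z") + 1)]
--
-- def best_move_freq_raw(
--     board: str, wrong_guesses: List[str], dictionary: List[str]
-- ) -> Optional[str]:
--     letters_already_found = {c for c in board if c != "."}
--     excluded = letters_already_found.union(wrong_guesses)
--     counts: Dict[str, int] = {c: 0 for c in ALPHABET if c not in excluded}
--     if not counts:
--         return None
--     for word in dictionary: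
--         for ch in word:
--             if ch in counts:
--                 counts[ch] += 1
--     max_count = max(counts.values(), default=0)
--     if max_count <= 0:
--         return None
--     # Argmax with alphabetical tie-break
--     return min([ch for ch, cnt in counts.items() if cnt == max_count])
-- ===== SOURCE B (Python) =====
-- ALPHABET = [chr(c) for c in range(ord("a"), ord("z") + 1)]
--
--
-- def best_move_freq_raw(board, wrong_guesses, dictionary):
--     # One pass over the alphabet keeping a running argmax; counts per letter
--     # come from str.count, so no frequency dict is built at all.
--     excluded = set(board) | set(wrong_guesses)
--     best = None
--     best_count = 0
--     for c in ALPHABET: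
--         if c in excluded:
--             continue
--         n = sum(word.count(c) for word in dictionary)
--         if n > best_count:
--             best, best_count = c, n
--     return best
-- ===== Notes on version B (the rewrite author's own statement) =====
-- stated objective: simpler
-- what changed: Replaced A's frequency-dict accumulation followed by separate max and min passes with a single pass over the alphabet keeping a running argmax, counting each candidate letter via str.count; no dict is built.
import Mathlib
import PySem

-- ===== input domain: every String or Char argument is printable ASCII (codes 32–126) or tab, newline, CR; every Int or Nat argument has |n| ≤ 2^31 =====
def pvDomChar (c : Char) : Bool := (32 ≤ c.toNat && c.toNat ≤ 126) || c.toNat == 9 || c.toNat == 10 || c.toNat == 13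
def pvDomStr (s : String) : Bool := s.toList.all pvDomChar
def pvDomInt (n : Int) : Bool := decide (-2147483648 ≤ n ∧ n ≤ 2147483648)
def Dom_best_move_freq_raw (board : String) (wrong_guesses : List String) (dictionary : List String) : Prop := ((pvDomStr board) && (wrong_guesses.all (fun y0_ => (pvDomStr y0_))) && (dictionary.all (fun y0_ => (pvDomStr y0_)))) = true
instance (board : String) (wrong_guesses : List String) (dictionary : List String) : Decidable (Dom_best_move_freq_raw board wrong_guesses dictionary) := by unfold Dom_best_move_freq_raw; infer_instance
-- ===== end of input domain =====

-- B replaces A's frequency-dict accumulation plus separate max/min passes by a single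
-- alphabet pass keeping a running argmax (per-letter totals via str.count): simpler, same cost.

-- ===== PORT A =====
-- module constant ALPHABET = [chr(c) for c in range(ord("a"), ord("z") + 1)]
def pvALPHABET : List String := (PySem.List.pyRange 97 123).map (fun n => String.ofList [Char.ofNat n.toNat])

def best_move_freq_raw (board : String) (wrong_guesses : List String) (dictionary : List String) : Option String :=
  let letters_already_found : PySem.Set String :=
    PySem.Set.ofList ((board.toList.filter (fun c => c != '.')).map (fun c => String.ofList [c]))
  let excluded : PySem.Set String := PySem.Set.union letters_already_found wrong_guesses
  let counts : PySem.Dict String Int :=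
    PySem.Dict.ofList ((pvALPHABET.filter (fun c => !(PySem.Set.contains excluded c))).map (fun c => (c, (0 : Int))))
  if counts.size = 0 then none
  else
    let counts2 := dictionary.foldl (fun d word =>
      word.toList.foldl (fun d ch =>
        if d.contains (String.ofList [ch]) then d.modify (String.ofList [ch]) 0 (· + 1) else d) d) counts
    let max_count := PySem.List.maxD counts2.values (fun v => v) 0
    if max_count ≤ 0 then none
    else PySem.List.min? ((counts2.items.filter (fun p => p.2 == max_count)).map (fun p => p.1)) (fun c => c)

-- ===== PORT B =====
def best_move_freq_raw_alt (board : String) (wrong_guesses : List String) (dictionary : List String) : Option String :=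
  let excluded : PySem.Set String :=
    PySem.Set.union (PySem.Set.ofList (board.toList.map (fun c => String.ofList [c]))) wrong_guesses
  (pvALPHABET.foldl (fun (st : Option String × Int) c =>
      if PySem.Set.contains excluded c then st
      else
        let n : Int := dictionary.foldl (fun acc word => acc + (PySem.Str.count word c : Int)) 0
        if st.2 < n then (some c, n) else st)
    ((none : Option String), (0 : Int))).1

-- ===== PRECONDITION & SPEC =====
def Spec_best_move_freq_raw (board : String) (wrong_guesses : List String) (dictionary : List String) (out : Option String) : Prop := out = best_move_freq_raw_alt board wrong_guesses dictionary
instance (board : String) (wrong_guesses : List String) (dictionary : List String) (out : Option String) : Decidable (Spec_best_move_freq_raw board wrong_guesses dictionary out) := by unfold Spec_best_move_freq_raw; infer_instance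

-- ===== CLAIM (what is proved, stated in full; the proofs are below) =====
def Claim_equal_best_move_freq_raw : Prop := ∀ (board : String) (wrong_guesses : List String) (dictionary : List String), Dom_best_move_freq_raw board wrong_guesses dictionary → Spec_best_move_freq_raw board wrong_guesses dictionary (best_move_freq_raw board wrong_guesses dictionary)

-- ===== LEMMAS AND PROOFS =====

-- names for the two loop bodies of port A (used only by the proofs; definitionally the port's lambdas)
def pvChStep (d : PySem.Dict String Int) (ch : Char) : PySem.Dict String Int :=
  if d.contains (String.ofList [ch]) then d.modify (String.ofList [ch]) 0 (· + 1) else d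

def pvWStep (d : PySem.Dict String Int) (word : String) : PySem.Dict String Int :=
  word.toList.foldl pvChStep d

-- the per-letter total both programs compute
def pvT (dictionary : List String) (c : String) : Int :=
  (dictionary.map (fun w => (PySem.Str.count w c : Int))).sum

theorem pv_ofList_inj (l l' : List Char) : String.ofList l = String.ofList l' ↔ l = l' := by
  constructor
  · intro h
    have h2 := congrArg String.toList h
    simpa [String.toList_ofList] using h2
  · intro h; rw [h]

theorem pv_chars_count_go_singleton (a : Char) : ∀ (fuel : Nat) (l : List Char) (acc : Nat),
    l.length ≤ fuel → PySem.Chars.count.go [a] fuel l acc = acc + l.count a := by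
  intro fuel
  induction fuel with
  | zero =>
    intro l acc h
    have : l = [] := List.length_eq_zero_iff.mp (Nat.le_zero.mp h)
    subst this
    simp [PySem.Chars.count.go]
  | succ n ih =>
    intro l acc h
    cases l with
    | nil => simp [PySem.Chars.count.go]
    | cons hd t =>
      by_cases hah : a = hd
      · subst hah
        have hpre : [a].isPrefixOf (a :: t) = true := by simp [List.isPrefixOf]
        have : PySem.Chars.count.go [a] (n+1) (a :: t) acc
            = PySem.Chars.count.go [a] n (List.drop 1 (a :: t)) (acc + 1) := by
          simp [PySem.Chars.count.go, hpre]
        rw [this]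
        simp only [List.drop_succ_cons, List.drop_zero]
        rw [ih t (acc + 1) (by simpa using Nat.lt_succ_iff.mp (Nat.lt_of_lt_of_le (by simp) h))]
        simp
        omega
      · have hpre : [a].isPrefixOf (hd :: t) = false := by
          simp [List.isPrefixOf, hah]
        have : PySem.Chars.count.go [a] (n+1) (hd :: t) acc
            = PySem.Chars.count.go [a] n t acc := by
          simp [PySem.Chars.count.go, hpre]
        rw [this, ih t acc (by simpa using Nat.succ_le_succ_iff.mp h)]
        have hcnt : (hd :: t).count a = t.count a := by
          simp [(Ne.symm hah : hd ≠ a)]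
        rw [hcnt]

theorem pv_chars_count_singleton (s : List Char) (a : Char) :
    PySem.Chars.count s [a] = s.count a := by
  have : PySem.Chars.count s [a] = PySem.Chars.count.go [a] s.length s 0 := by
    simp [PySem.Chars.count]
  rw [this, pv_chars_count_go_singleton a s.length s 0 (le_refl _)]
  simp

theorem pv_str_count_singleton (w : String) (a : Char) :
    PySem.Str.count w (String.ofList [a]) = w.toList.count a := by
  rw [PySem.Str.count_eq, String.toList_ofList, pv_chars_count_singleton]

theorem pv_word_keys (w : List Char) : ∀ (d : PySem.Dict String Int),
    (w.foldl pvChStep d).keys = d.keys := by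
  induction w with
  | nil => intro d; rfl
  | cons ch t ih =>
    intro d
    rw [List.foldl_cons, ih]
    by_cases hc : d.contains (String.ofList [ch]) = true
    · simp only [pvChStep, hc, if_true]
      rw [PySem.Dict.keys_modify, PySem.Dict.keys_insert_of_contains _ _ hc]
    · simp [pvChStep, hc]

theorem pv_word_contains (w : List Char) (d : PySem.Dict String Int) (c : String) :
    (w.foldl pvChStep d).contains c = d.contains c := by
  apply Bool.coe_iff_coe.mp
  rw [PySem.Dict.contains_iff_mem_keys, PySem.Dict.contains_iff_mem_keys, pv_word_keys]

theorem pv_dict_keys (ws : List String) : ∀ (d : PySem.Dict String Int),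
    (ws.foldl pvWStep d).keys = d.keys := by
  induction ws with
  | nil => intro d; rfl
  | cons w t ih =>
    intro d
    rw [List.foldl_cons, ih, pvWStep, pv_word_keys]

theorem pv_word_getD (a : Char) (w : List Char) : ∀ (d : PySem.Dict String Int),
    d.contains (String.ofList [a]) = true →
    (w.foldl pvChStep d).getD (String.ofList [a]) 0 = d.getD (String.ofList [a]) 0 + (w.count a : Int) := by
  induction w with
  | nil => intro d _; simp
  | cons ch t ih =>
    intro d hc
    rw [List.foldl_cons]
    by_cases hch : ch = a
    · subst hch
      have hstep : pvChStep d ch = d.modify (String.ofList [ch]) 0 (· + 1) := by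
        simp [pvChStep, hc]
      have hc' : (pvChStep d ch).contains (String.ofList [ch]) = true := by
        rw [hstep, PySem.Dict.contains_modify]; simp
      rw [ih _ hc', hstep, PySem.Dict.getD_modify_self]
      simp
      ring
    · have hne : String.ofList [ch] ≠ String.ofList [a] := by
        intro h
        exact hch (by simpa using (pv_ofList_inj [ch] [a]).mp h)
      have hcnt : ((ch :: t).count a : Int) = (t.count a : Int) := by
        simp [hch]
      by_cases hc2 : d.contains (String.ofList [ch]) = true
      · have hstep : pvChStep d ch = d.modify (String.ofList [ch]) 0 (· + 1) := by
          simp [pvChStep, hc2]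
        have hc' : (pvChStep d ch).contains (String.ofList [a]) = true := by
          rw [hstep, PySem.Dict.contains_modify, hc]; simp
        rw [ih _ hc', hstep, PySem.Dict.getD_modify_of_ne _ _ _ (Ne.symm hne), hcnt]
      · have hstep : pvChStep d ch = d := by simp [pvChStep, hc2]
        rw [hstep, ih _ hc, hcnt]

theorem pv_dict_getD (a : Char) (ws : List String) : ∀ (d : PySem.Dict String Int),
    d.contains (String.ofList [a]) = true →
    (ws.foldl pvWStep d).getD (String.ofList [a]) 0
      = d.getD (String.ofList [a]) 0 + (ws.map (fun w => (w.toList.count a : Int))).sum := by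
  induction ws with
  | nil => intro d _; simp
  | cons w t ih =>
    intro d hc
    have hc1 : (pvWStep d w).contains (String.ofList [a]) = true := by
      rw [pvWStep, pv_word_contains]; exact hc
    rw [List.foldl_cons, ih _ hc1]
    show (pvWStep d w).getD _ 0 + _ = _
    rw [pvWStep, pv_word_getD a _ d hc]
    simp [List.sum_cons]
    ring

theorem pv_alpha_shape : ∀ c ∈ pvALPHABET, ∃ a : Char, c = String.ofList [a] ∧ a ≠ '.' := by
  intro c hc
  simp only [pvALPHABET, List.mem_map] at hc
  obtain ⟨n, hn, rfl⟩ := hc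
  rw [PySem.List.mem_pyRange_one] at hn
  refine ⟨Char.ofNat n.toNat, rfl, ?_⟩
  obtain ⟨h1, h2⟩ := hn
  interval_cases n <;> decide

theorem pv_alpha_pairwise : pvALPHABET.Pairwise (· < ·) := by
  have h : (pvALPHABET.map String.toList).Pairwise (· < ·) := by decide
  rw [List.pairwise_map] at h
  exact h.imp (fun hlt => String.lt_iff_toList_lt.mpr hlt)

theorem pv_excluded_eq (board : String) (wrong_guesses : List String) :
    ∀ c ∈ pvALPHABET,
      PySem.Set.contains (PySem.Set.union (PySem.Set.ofList (board.toList.map (fun c => String.ofList [c]))) wrong_guesses) c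
      = PySem.Set.contains (PySem.Set.union (PySem.Set.ofList ((board.toList.filter (fun c => c != '.')).map (fun c => String.ofList [c]))) wrong_guesses) c := by
  intro c hc
  obtain ⟨a, rfl, hne⟩ := pv_alpha_shape c hc
  apply Bool.coe_iff_coe.mp
  rw [PySem.Set.contains_iff, PySem.Set.contains_iff]
  simp only [PySem.Set.union, PySem.Set.mem_update, PySem.Set.mem_ofList, List.mem_map,
    List.mem_filter, pv_ofList_inj, bne_iff_ne]
  constructor
  · rintro (⟨x, hx, hxa⟩ | hw)
    · have : x = a := by simpa using hxa
      subst this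
      exact Or.inl ⟨x, ⟨hx, hne⟩, rfl⟩
    · exact Or.inr hw
  · rintro (⟨x, ⟨hx, _⟩, hxa⟩ | hw)
    · exact Or.inl ⟨x, hx, hxa⟩
    · exact Or.inr hw

theorem pv_filter_map' {α β : Type} (f : α → β) (p : β → Bool) (l : List α) :
    (l.map f).filter p = (l.filter (fun x => p (f x))).map f := by
  induction l with
  | nil => rfl
  | cons x t ih =>
    by_cases h : p (f x) = true <;> simp [h, ih]

theorem pv_argmax_fold (t : String → Int) : ∀ (cs : List String) (b : Option String) (m : Int),
    cs.foldl (fun st c => if st.2 < t c then (some c, t c) else st) (b, m)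
      = (if (cs.map t).foldl max m ≤ m then b
         else cs.find? (fun c => decide ((cs.map t).foldl max m ≤ t c)),
         (cs.map t).foldl max m) := by
  intro cs
  induction cs with
  | nil => intro b m; simp
  | cons c cs ih =>
    intro b m
    simp only [List.map_cons, List.foldl_cons]
    by_cases h : m < t c
    · rw [if_pos h]
      have hM : max m (t c) = t c := max_eq_right (le_of_lt h)
      simp only [hM]
      rw [ih (some c) (t c)]
      have hle : t c ≤ (cs.map t).foldl max (t c) := (PySem.List.le_foldl_max _ _).1
      have hnm : ¬ ((cs.map t).foldl max (t c) ≤ m) := by omega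
      rw [if_neg hnm, List.find?_cons]
      by_cases hd : (cs.map t).foldl max (t c) ≤ t c
      · simp [hd]
      · simp [hd]
    · rw [if_neg h]
      have hM : max m (t c) = m := max_eq_left (by omega)
      simp only [hM]
      rw [ih b m]
      by_cases hm : (cs.map t).foldl max m ≤ m
      · rw [if_pos hm, if_pos hm]
      · rw [if_neg hm, if_neg hm, List.find?_cons]
        have hd : ¬ ((cs.map t).foldl max m ≤ t c) := by omega
        simp [hd]

theorem pv_min?_pairwise (l : List String) (h : l.Pairwise (· < ·)) :
    PySem.List.min? l (fun c => c) = l.head? := by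
  cases l with
  | nil => rfl
  | cons x t =>
    rw [PySem.List.min?_id_cons]
    have hmem := PySem.List.foldl_min_mem t x
    have hle := (PySem.List.foldl_min_le t x).1
    rcases hmem with heq | hmem
    · rw [heq]; rfl
    · exfalso
      have hx : x < t.foldl min x := (List.pairwise_cons.mp h).1 _ hmem
      exact absurd hle (not_le.mpr hx)

theorem pv_T_nonneg (dictionary : List String) (c : String) : 0 ≤ pvT dictionary c := by
  apply List.sum_nonneg
  intro x hx
  simp only [List.mem_map] at hx
  obtain ⟨w, _, rfl⟩ := hx
  exact Int.natCast_nonneg _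

-- ===== VERDICT (by name: the statement is the Claim_ definition above) =====
theorem best_move_freq_raw_spec : Claim_equal_best_move_freq_raw := by
  intro board wrong_guesses dictionary _dom
  show best_move_freq_raw board wrong_guesses dictionary
      = best_move_freq_raw_alt board wrong_guesses dictionary
  simp only [best_move_freq_raw, best_move_freq_raw_alt]
  rw [show (fun (d : PySem.Dict String Int) (word : String) => word.toList.foldl (fun d ch =>
        if d.contains (String.ofList [ch]) then d.modify (String.ofList [ch]) 0 (· + 1) else d) d)
      = pvWStep from rfl]
  set EA := PySem.Set.union (PySem.Set.ofList ((board.toList.filter (fun c => c != '.')).map (fun c => String.ofList [c]))) wrong_guesses with hEAdef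
  set EB := PySem.Set.union (PySem.Set.ofList (board.toList.map (fun c => String.ofList [c]))) wrong_guesses with hEBdef
  -- B's loop: drop the excluded letters, then it is a pure running argmax over the candidates
  rw [PySem.List.foldl_congr_mem pvALPHABET
      (fun (st : Option String × Int) c =>
        if PySem.Set.contains EB c then st
        else
          let n : Int := dictionary.foldl (fun acc word => acc + (PySem.Str.count word c : Int)) 0
          if st.2 < n then (some c, n) else st)
      (fun (st : Option String × Int) c =>
        if (!(PySem.Set.contains EA c)) = true
        then (if st.2 < pvT dictionary c then (some c, pvT dictionary c) else st) else st)
      ((none : Option String), (0 : Int))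
      (by
        intro st c hc
        have hT : dictionary.foldl (fun acc word => acc + (PySem.Str.count word c : Int)) 0
            = pvT dictionary c := by
          rw [PySem.List.foldl_add]; simp [pvT]
        have hBE : PySem.Set.contains EB c = PySem.Set.contains EA c := by
          rw [hEAdef, hEBdef]; exact pv_excluded_eq board wrong_guesses c hc
        simp only [hT]
        cases hE : PySem.Set.contains EA c with
        | true =>
          rw [if_pos (show PySem.Set.contains EB c = true by rw [hBE, hE]), if_neg (by simp)]
        | false =>
          rw [if_neg (show ¬ PySem.Set.contains EB c = true by
                intro h; rw [hBE, hE] at h; exact Bool.false_ne_true h),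
              if_pos (show (!false) = true by rfl)])]
  rw [PySem.List.foldl_if_eq_foldl_filter]
  set cands := pvALPHABET.filter (fun c => !(PySem.Set.contains EA c)) with hcandsdef
  set counts0 := PySem.Dict.ofList (cands.map (fun c => (c, (0 : Int)))) with hc0def
  have candsPairwise : cands.Pairwise (· < ·) := pv_alpha_pairwise.filter _
  have candsNodup : cands.Nodup := candsPairwise.imp ne_of_lt
  have candsSub : ∀ c ∈ cands, c ∈ pvALPHABET := fun c hc => List.mem_of_mem_filter hc
  have hitems0 : counts0.items = cands.map (fun c => (c, (0 : Int))) := by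
    rw [hc0def, PySem.Dict.ofList, PySem.Dict.update, List.foldl_map]
    rw [PySem.Dict.items_foldl_insert_fresh cands (fun c => c) (fun _ => (0 : Int)) PySem.Dict.empty
        (fun a _ => PySem.Dict.contains_empty a) (by simpa using candsNodup)]
    simp [PySem.Dict.empty]
  have hkeys0 : counts0.keys = cands := by
    simp only [PySem.Dict.keys, hitems0, List.map_map]
    exact List.map_id' _
  have hnodupkeys : counts0.keys.Nodup := by rw [hkeys0]; exact candsNodup
  have hsize : counts0.size = cands.length := by simp [PySem.Dict.size, hitems0]
  have hFkeys : (dictionary.foldl pvWStep counts0).keys = cands := by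
    rw [pv_dict_keys]; exact hkeys0
  have hFgetD : ∀ c ∈ cands, (dictionary.foldl pvWStep counts0).getD c 0 = pvT dictionary c := by
    intro c hcm
    obtain ⟨a, rfl, -⟩ := pv_alpha_shape c (candsSub c hcm)
    have hc0 : counts0.contains (String.ofList [a]) = true :=
      (PySem.Dict.contains_iff_mem_keys _ _).mpr (by rw [hkeys0]; exact hcm)
    have hm : ((String.ofList [a]), (0 : Int)) ∈ counts0.items := by
      rw [hitems0]; exact List.mem_map.mpr ⟨_, hcm, rfl⟩
    have hg0 : counts0.getD (String.ofList [a]) 0 = 0 :=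
      PySem.Dict.getD_of_mem_items _ hm hnodupkeys 0
    rw [pv_dict_getD a dictionary counts0 hc0, hg0, zero_add, pvT]
    exact congrArg List.sum (List.map_eq_map_iff.mpr (fun w _ => by
      rw [pv_str_count_singleton]))
  have hFitems : (dictionary.foldl pvWStep counts0).items
      = cands.map (fun k => (k, pvT dictionary k)) := by
    rw [PySem.Dict.items_eq_map_keys _ (by rw [hFkeys]; exact candsNodup) 0, hFkeys]
    exact List.map_eq_map_iff.mpr (fun k hk => by rw [hFgetD k hk])
  have hFvalues : (dictionary.foldl pvWStep counts0).values
      = cands.map (fun k => pvT dictionary k) := by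
    show (dictionary.foldl pvWStep counts0).items.map _ = _
    rw [hFitems, List.map_map]
    rfl
  rcases hnil : cands with _ | ⟨c0, cs⟩
  · -- no candidate letter at all: both sides return none
    rw [if_pos (by rw [hsize, hnil]; rfl)]
    rfl
  · rw [if_neg (by rw [hsize, hnil]; simp)]
    have hM : PySem.List.maxD (dictionary.foldl pvWStep counts0).values (fun v => v) 0
        = (cs.map (pvT dictionary)).foldl max (pvT dictionary c0) := by
      rw [hFvalues, hnil, List.map_cons, PySem.List.maxD, PySem.List.max?_id_cons]
      rfl
    simp only [hM]
    rw [pv_argmax_fold (pvT dictionary) (c0 :: cs) none 0]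
    rw [show ∀ (x : Option String) (y : Int), (x, y).1 = x from fun _ _ => rfl]
    have hMB : (List.map (pvT dictionary) (c0 :: cs)).foldl max 0
        = (cs.map (pvT dictionary)).foldl max (pvT dictionary c0) := by
      rw [List.map_cons, List.foldl_cons, max_eq_right (pv_T_nonneg dictionary c0)]
    simp only [hMB]
    set M := (cs.map (pvT dictionary)).foldl max (pvT dictionary c0) with hMdef
    have hbound : ∀ c ∈ (c0 :: cs : List String), pvT dictionary c ≤ M := by
      intro c hcm
      rcases List.mem_cons.mp hcm with rfl | hcs
      · exact (PySem.List.le_foldl_max _ _).1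
      · exact (PySem.List.le_foldl_max _ _).2 _ (List.mem_map.mpr ⟨c, hcs, rfl⟩)
    by_cases hMle : M ≤ 0
    · rw [if_pos hMle, if_pos hMle]
    · rw [if_neg hMle, if_neg hMle]
      rw [hFitems, hnil, pv_filter_map', List.map_map]
      have hpair : ((fun (p : String × Int) => p.1) ∘ fun k => (k, pvT dictionary k))
          = fun (k : String) => k := rfl
      rw [hpair, List.map_id']
      rw [pv_min?_pairwise _ (by
        rw [← hnil]
        exact candsPairwise.filter _)]
      rw [← List.head?_filter]
      have hpq : ∀ c ∈ (c0 :: cs : List String),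
          (fun c => decide (M ≤ pvT dictionary c)) c
            = (fun c => (pvT dictionary c == M)) c := by
        intro c hcm
        have hb := hbound c hcm
        by_cases he : pvT dictionary c = M
        · simp [he]
        · have hnle : ¬ (M ≤ pvT dictionary c) := fun hle => he (le_antisymm hb hle)
          simp [he, hnle]
      rw [List.filter_congr hpq]
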